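-- pv_equiv track=rewrite | github.com/jdarov/PY_110 | STUDY_GUIDE/largest_consec_sum.py | list_of_consec_ints
-- ===== SOURCE A (Python) =====
-- def list_of_consec_ints(lst):
--     results = []
--     for start in range(len(lst)):
--         seen = set()
--         for end in range(start, len(lst)):
--             num = lst[end]
--             if num in seen:
--                 break
--             seen.add(num)
--             results.append(lst[start:end + 1])
--     return results
-- ===== SOURCE B (Python) =====
-- def list_of_consec_ints(lst):
--     n = len(lst)
--     results = []
--     seen = set()
--     right = 0
--     for start in range(n):
--         while right < n and lst[right] not in seen:
--             seen.add(lst[right])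
--             right += 1
--         for end in range(start, right):
--             results.append(lst[start:end + 1])
--         seen.discard(lst[start])
--     return results
-- ===== Notes on version B (the rewrite author's own statement) =====
-- stated objective: alternative
-- what changed: Replaces A's restart-from-scratch inner scan (a fresh seen set per start) with a single sliding-window two-pointer sweep: one persistent seen set and a forward-only right pointer locate each maximal distinct window (amortized O(n) index moves), then the same slices are emitted in the same order; total cost is still dominated by materializing the output slices, so overall runtime is comparable.
import Mathlib
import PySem

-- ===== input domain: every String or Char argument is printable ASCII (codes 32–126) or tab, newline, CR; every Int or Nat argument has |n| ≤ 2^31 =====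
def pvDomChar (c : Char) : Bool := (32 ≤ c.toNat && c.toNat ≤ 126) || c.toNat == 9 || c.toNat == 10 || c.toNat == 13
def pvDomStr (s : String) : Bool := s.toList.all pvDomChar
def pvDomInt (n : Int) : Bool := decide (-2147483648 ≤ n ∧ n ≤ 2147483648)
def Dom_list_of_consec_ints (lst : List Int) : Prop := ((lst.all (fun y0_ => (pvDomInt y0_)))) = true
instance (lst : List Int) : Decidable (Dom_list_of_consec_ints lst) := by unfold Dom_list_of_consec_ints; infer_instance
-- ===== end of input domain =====

-- B replaces A's restart-per-start inner scan with one sliding-window two-pointer sweep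
-- (a persistent seen set and a forward-only right pointer); same value on every input.

-- ===== PORT A =====
-- inner 'for end in range(start, len(lst))' with 'break': recursion over the remaining range list
def pvInnerA (lst : List Int) (start : Int) : List Int → PySem.Set Int → List (List Int) → List (List Int)
  | [], _, results => results
  | e :: rest, seen, results =>
      let num := PySem.List.pyGetD lst e 0   -- lst[end]; index always in range here
      if PySem.Set.contains seen num then results
      else pvInnerA lst start rest (PySem.Set.add seen num)
             (results ++ [PySem.List.slice lst (some start) (some (e + 1))])

def list_of_consec_ints (lst : List Int) : List (List Int) :=
  (PySem.List.pyRange 0 (PySem.List.len lst) 1).foldl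
    (fun results start =>
      pvInnerA lst start (PySem.List.pyRange start (PySem.List.len lst) 1) PySem.Set.empty results)
    []

-- ===== PORT B =====
-- 'while right < n and lst[right] not in seen': recursion, terminating on n - right
def pvExtendB (lst : List Int) (right : Int) (seen : PySem.Set Int) : Int × PySem.Set Int :=
  if h : right < PySem.List.len lst ∧
         ¬ (PySem.Set.contains seen (PySem.List.pyGetD lst right 0) = true) then
    pvExtendB lst (right + 1) (PySem.Set.add seen (PySem.List.pyGetD lst right 0))
  else (right, seen)
termination_by (PySem.List.len lst - right).toNat
decreasing_by
  simp only [PySem.List.len] at h ⊢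
  omega

def list_of_consec_ints_alt (lst : List Int) : List (List Int) :=
  let n := PySem.List.len lst
  ((PySem.List.pyRange 0 n 1).foldl
    (fun (state : List (List Int) × PySem.Set Int × Int) start =>
      match state with
      | (results, seen, right) =>
        match pvExtendB lst right seen with
        | (right', seen') =>
          let results' := (PySem.List.pyRange start right' 1).foldl
            (fun res e => res ++ [PySem.List.slice lst (some start) (some (e + 1))]) results
          (results', PySem.Set.discard seen' (PySem.List.pyGetD lst start 0), right'))
    ([], PySem.Set.empty, 0)).1

-- ===== PRECONDITION & SPEC =====
def Spec_list_of_consec_ints (lst : List Int) (out : List (List Int)) : Prop := out = list_of_consec_ints_alt lst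
instance (lst : List Int) (out : List (List Int)) : Decidable (Spec_list_of_consec_ints lst out) := by unfold Spec_list_of_consec_ints; infer_instance

-- ===== CLAIM (what is proved, stated in full; the proofs are below) =====
def Claim_equal_list_of_consec_ints : Prop := ∀ (lst : List Int), Dom_list_of_consec_ints lst → Spec_list_of_consec_ints lst (list_of_consec_ints lst)

-- ===== LEMMAS AND PROOFS =====

-- greedy distinct-prefix length: how many further elements the scan takes before a repeat
def pvWlen (seen : List Int) : List Int → Nat
  | [] => 0
  | x :: xs => if seen.contains x then 0 else pvWlen (seen ++ [x]) xs + 1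

-- the current window lst[s:r]
def pvWin (lst : List Int) (s r : Nat) : List Int := (lst.drop s).take (r - s)

-- the slices A appends for one start s
def pvBody (lst : List Int) (s : Nat) : List (List Int) :=
  (List.range (pvWlen [] (lst.drop s))).map (fun k => (lst.drop s).take (k + 1))

lemma pvWlen_cons_mem {seen : List Int} {x : Int} (h : x ∈ seen) (xs : List Int) :
    pvWlen seen (x :: xs) = 0 := by
  simp [pvWlen, List.contains_iff_mem, h]

lemma pvWlen_cons_not_mem {seen : List Int} {x : Int} (h : x ∉ seen) (xs : List Int) :
    pvWlen seen (x :: xs) = pvWlen (seen ++ [x]) xs + 1 := by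
  simp [pvWlen, List.contains_iff_mem, h]

lemma pvWlen_le_length (seen xs : List Int) : pvWlen seen xs ≤ xs.length := by
  induction xs generalizing seen with
  | nil => simp [pvWlen]
  | cons x xs ih =>
    simp only [pvWlen, List.length_cons]
    split
    · omega
    · exact Nat.succ_le_succ (ih _)

lemma pvWlen_acc (w : List Int) : ∀ (seen rest : List Int), w.Nodup → (∀ x ∈ w, x ∉ seen) →
    pvWlen seen (w ++ rest) = w.length + pvWlen (seen ++ w) rest := by
  induction w with
  | nil => simp
  | cons x w ih =>
    intro seen rest hnd hdis
    have hx : x ∉ seen := hdis x (by simp)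
    rw [List.cons_append, pvWlen_cons_not_mem hx]
    rw [ih (seen ++ [x]) rest hnd.of_cons]
    · simp only [List.length_cons, List.append_assoc, List.singleton_append]
      omega
    · intro y hy
      simp only [List.mem_append, List.mem_singleton, not_or]
      exact ⟨hdis y (by simp [hy]), fun h => (List.nodup_cons.mp hnd).1 (h ▸ hy)⟩

lemma pvWlen_take_nodup (xs : List Int) : ∀ (seen : List Int), seen.Nodup →
    (seen ++ xs.take (pvWlen seen xs)).Nodup := by
  induction xs with
  | nil => intro seen h; simpa [pvWlen]
  | cons x xs ih =>
    intro seen h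
    by_cases hx : x ∈ seen
    · rw [pvWlen_cons_mem hx]
      simpa
    · rw [pvWlen_cons_not_mem hx, List.take_succ_cons]
      have hnd2 : (seen ++ [x]).Nodup := by
        simp [List.nodup_append, h]
        intro a ha h2
        exact hx (h2 ▸ ha)
      have := ih (seen ++ [x]) hnd2
      simpa [List.append_assoc] using this

-- decomposition of the tail at the window edge
lemma pvWin_length (lst : List Int) (s r : Nat) (hr : r ≤ lst.length) :
    (pvWin lst s r).length = r - s := by
  unfold pvWin
  simp only [List.length_take, List.length_drop]
  omega

lemma pvWin_drop (lst : List Int) (s r : Nat) (hsr : s ≤ r) (hr : r ≤ lst.length) :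
    lst.drop s = pvWin lst s r ++ lst.drop r := by
  have h := List.take_append_drop (r - s) (lst.drop s)
  unfold pvWin
  rw [List.drop_drop] at h
  rw [show s + (r - s) = r from by omega] at h
  exact h.symm

lemma pvWin_snoc (lst : List Int) (s r : Nat) (hsr : s ≤ r) (hr : r < lst.length) :
    pvWin lst s (r + 1) = pvWin lst s r ++ [lst[r]] := by
  unfold pvWin
  have h1 : r + 1 - s = (r - s) + 1 := by omega
  rw [h1, List.take_succ]
  congr 1
  have h2 : (lst.drop s)[r - s]? = some lst[r] := by
    rw [List.getElem?_drop, show s + (r - s) = r from by omega]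
    exact List.getElem?_eq_getElem hr
  simp [h2]

lemma pvWin_cons (lst : List Int) (s r : Nat) (hs : s < r) (hsl : s < lst.length) :
    pvWin lst s r = lst[s] :: pvWin lst (s + 1) r := by
  unfold pvWin
  rw [List.drop_eq_getElem_cons hsl]
  have h1 : r - s = (r - (s + 1)) + 1 := by omega
  rw [h1, List.take_succ_cons]

-- characterization of B's while loop
lemma pvExtendB_spec (lst : List Int) : ∀ (d s r : Nat), lst.length - r ≤ d → s ≤ r → r ≤ lst.length →
    (pvWin lst s r).Nodup →
    pvExtendB lst (r : Int) (pvWin lst s r) =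
      (((s + pvWlen [] (lst.drop s) : Nat) : Int), pvWin lst s (s + pvWlen [] (lst.drop s))) := by
  intro d
  induction d with
  | zero =>
    intro s r hd hsr hr hnd
    have hrl : r = lst.length := by omega
    have hdrop : lst.drop s = pvWin lst s r ++ lst.drop r := pvWin_drop lst s r hsr hr
    have hw : pvWlen [] (lst.drop s) = r - s := by
      rw [hdrop, pvWlen_acc _ _ _ hnd (by simp)]
      have h0 : lst.drop r = [] := by simp [hrl]
      rw [h0]
      simp only [pvWlen, List.nil_append]
      rw [pvWin_length lst s r hr]
      omega
    rw [pvExtendB]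
    rw [dif_neg (by simp [PySem.List.len]; omega)]
    rw [hw]
    congr 2 <;> omega
  | succ d ih =>
    intro s r hd hsr hr hnd
    have hdrop : lst.drop s = pvWin lst s r ++ lst.drop r := pvWin_drop lst s r hsr hr
    by_cases hrl : r < lst.length
    · have hget : PySem.List.pyGetD lst (r : Int) 0 = lst[r] := by
        rw [PySem.List.pyGetD_natCast, List.getD_eq_getElem?_getD, List.getElem?_eq_getElem hrl]
        rfl
      have hdr : lst.drop r = lst[r] :: lst.drop (r + 1) := List.drop_eq_getElem_cons hrl
      by_cases hmem : lst[r] ∈ pvWin lst s r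
      · -- repeat found: loop stops, r is already maximal
        have hw : pvWlen [] (lst.drop s) = r - s := by
          rw [hdrop, pvWlen_acc _ _ _ hnd (by simp), hdr, List.nil_append,
            pvWlen_cons_mem hmem, pvWin_length lst s r hr]
          omega
        rw [pvExtendB]
        rw [dif_neg (by
          simp only [hget, PySem.Set.contains, not_and, not_not, List.contains_iff_mem,
            decide_eq_true_eq]
          intro _; exact hmem)]
        rw [hw]
        congr 2 <;> omega
      · -- extend the window by one
        have hcond : (r : Int) < PySem.List.len lst ∧
            ¬ (PySem.Set.contains (pvWin lst s r) (PySem.List.pyGetD lst (r : Int) 0) = true) := by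
          constructor
          · simp [PySem.List.len]; exact_mod_cast hrl
          · simp only [hget, PySem.Set.contains, List.contains_iff_mem, decide_eq_true_eq]
            exact hmem
        rw [pvExtendB, dif_pos hcond]
        have hadd : PySem.Set.add (pvWin lst s r) (PySem.List.pyGetD lst (r : Int) 0)
            = pvWin lst s (r + 1) := by
          rw [hget]
          simp only [PySem.Set.add, PySem.Set.contains]
          have hneg : ¬ (List.contains (pvWin lst s r) lst[r] = true) := by
            simp only [List.contains_iff_mem]
            exact hmem
          rw [if_neg hneg]
          exact (pvWin_snoc lst s r hsr hrl).symm
        have hnd' : (pvWin lst s (r + 1)).Nodup := by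
          rw [pvWin_snoc lst s r hsr hrl]
          refine List.Nodup.append hnd (List.nodup_singleton _) ?_
          intro a ha hb
          rw [List.mem_singleton] at hb
          exact hmem (hb ▸ ha)
        have : ((r : Int) + 1) = ((r + 1 : Nat) : Int) := by push_cast; ring
        rw [hadd, this]
        exact ih s (r + 1) (by omega) (by omega) (by omega) hnd'
    · have hrl2 : r = lst.length := by omega
      have hw : pvWlen [] (lst.drop s) = r - s := by
        rw [hdrop, pvWlen_acc _ _ _ hnd (by simp)]
        have h0 : lst.drop r = [] := by simp [hrl2]
        rw [h0]
        simp only [pvWlen, List.nil_append]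
        rw [pvWin_length lst s r hr]
        omega
      rw [pvExtendB]
      rw [dif_neg (by simp [PySem.List.len]; omega)]
      rw [hw]
      congr 2 <;> omega

-- A's inner loop produces exactly the distinct-prefix slices
lemma pvInnerA_spec (lst : List Int) (s : Nat) : ∀ (d e : Nat) (seen : PySem.Set Int)
    (results : List (List Int)), lst.length - e ≤ d → s ≤ e →
    pvInnerA lst (s : Int) (PySem.List.pyRange (e : Int) (PySem.List.len lst) 1) seen results =
      results ++ (List.range (pvWlen seen (lst.drop e))).map
        (fun k => (lst.drop s).take (e + k + 1 - s)) := by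
  intro d
  induction d with
  | zero =>
    intro e seen results hd hse
    have he : lst.length ≤ e := by omega
    rw [PySem.List.pyRange_one_eq_nil (by simp [PySem.List.len]; exact_mod_cast he)]
    simp [pvInnerA, List.drop_eq_nil_of_le he, pvWlen]
  | succ d ih =>
    intro e seen results hd hse
    by_cases hel : e < lst.length
    · rw [PySem.List.pyRange_one_cons (by simp [PySem.List.len]; exact_mod_cast hel)]
      have hget : PySem.List.pyGetD lst (e : Int) 0 = lst[e] := by
        rw [PySem.List.pyGetD_natCast, List.getD_eq_getElem?_getD, List.getElem?_eq_getElem hel]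
        rfl
      have hdr : lst.drop e = lst[e] :: lst.drop (e + 1) := List.drop_eq_getElem_cons hel
      simp only [pvInnerA, hget]
      by_cases hmem : lst[e] ∈ seen
      · rw [if_pos (by simpa [PySem.Set.contains, List.contains_iff_mem] using hmem)]
        rw [hdr, pvWlen_cons_mem hmem]
        simp
      · rw [if_neg (by simpa [PySem.Set.contains, List.contains_iff_mem] using hmem)]
        have hcast : ((e : Int) + 1) = ((e + 1 : Nat) : Int) := by push_cast; ring
        rw [hcast, ih (e + 1) _ _ (by omega) (by omega)]
        have hadd : PySem.Set.add seen lst[e] = seen ++ [lst[e]] := by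
          simp only [PySem.Set.add, PySem.Set.contains]
          rw [if_neg (by simpa [List.contains_iff_mem] using hmem)]
        rw [hadd, hdr, pvWlen_cons_not_mem hmem, List.range_succ_eq_map]
        have hsl : PySem.List.slice lst (some (s : Int)) (some ((e : Int) + 1))
            = (lst.drop s).take (e + 0 + 1 - s) := by
          have h1 : ((e : Int) + 1) = ((s : Int) + ((e + 1 - s : Nat) : Int)) := by push_cast; omega
          rw [h1, PySem.List.slice_natCast_add]
        simp only [List.map_cons, List.map_map, List.append_assoc, List.singleton_append, hsl]
        congr 2
        apply List.map_congr_left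
        intro k _
        simp only [Function.comp_apply]
        congr 1
        omega
    · rw [PySem.List.pyRange_one_eq_nil (by simp [PySem.List.len]; omega)]
      simp [pvInnerA, List.drop_eq_nil_of_le (by omega : lst.length ≤ e), pvWlen]

-- A's outer loop = concatenation of the per-start slice blocks
lemma pvOuterA (lst : List Int) : ∀ (d s : Nat) (results : List (List Int)),
    lst.length - s ≤ d → s ≤ lst.length →
    (PySem.List.pyRange (s : Int) (PySem.List.len lst) 1).foldl
      (fun results start =>
        pvInnerA lst start (PySem.List.pyRange start (PySem.List.len lst) 1) PySem.Set.empty results)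
      results
    = results ++ (List.range' s (lst.length - s)).flatMap (pvBody lst) := by
  intro d
  induction d with
  | zero =>
    intro s results hd hs
    have : s = lst.length := by omega
    subst this
    rw [PySem.List.pyRange_one_eq_nil (by simp [PySem.List.len])]
    simp
  | succ d ih =>
    intro s results hd hs
    by_cases hsl : s < lst.length
    · rw [PySem.List.pyRange_one_cons (by simp [PySem.List.len]; exact_mod_cast hsl)]
      rw [List.foldl_cons]
      have hcast : ((s : Int) + 1) = ((s + 1 : Nat) : Int) := by push_cast; ring
      rw [pvInnerA_spec lst s (lst.length - s) s PySem.Set.empty results (by omega) le_rfl]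
      rw [hcast, ih (s + 1) _ (by omega) (by omega)]
      have hr : lst.length - s = (lst.length - (s + 1)) + 1 := by omega
      rw [hr, List.range'_succ, List.flatMap_cons, ← List.append_assoc]
      congr 2
      unfold pvBody
      apply List.map_congr_left
      intro k _
      congr 1
      omega
    · have : s = lst.length := by omega
      subst this
      rw [PySem.List.pyRange_one_eq_nil (by simp [PySem.List.len])]
      simp

-- B's outer loop: sliding-window invariant (seen = lst[s:r], distinct)
lemma pvOuterB (lst : List Int) : ∀ (d s r : Nat) (results : List (List Int)),
    lst.length - s ≤ d → s ≤ r → r ≤ lst.length → (pvWin lst s r).Nodup →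
    ((PySem.List.pyRange (s : Int) (PySem.List.len lst) 1).foldl
      (fun (state : List (List Int) × PySem.Set Int × Int) start =>
        match state with
        | (results, seen, right) =>
          match pvExtendB lst right seen with
          | (right', seen') =>
            let results' := (PySem.List.pyRange start right' 1).foldl
              (fun res e => res ++ [PySem.List.slice lst (some start) (some (e + 1))]) results
            (results', PySem.Set.discard seen' (PySem.List.pyGetD lst start 0), right'))
      (results, pvWin lst s r, (r : Int))).1
    = results ++ (List.range' s (lst.length - s)).flatMap (pvBody lst) := by
  intro d
  induction d with
  | zero =>
    intro s r results hd hsr hr hnd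
    have : s = lst.length := by omega
    subst this
    rw [PySem.List.pyRange_one_eq_nil (by simp [PySem.List.len])]
    simp
  | succ d ih =>
    intro s r results hd hsr hr hnd
    by_cases hsl : s < lst.length
    · rw [PySem.List.pyRange_one_cons (by simp [PySem.List.len]; exact_mod_cast hsl)]
      rw [List.foldl_cons]
      have hext := pvExtendB_spec lst (lst.length - r) s r (by omega) hsr hr hnd
      generalize hw : pvWlen [] (lst.drop s) = w at hext
      have hw1 : 1 ≤ w := by
        rw [← hw, List.drop_eq_getElem_cons hsl]
        simp [pvWlen]
      have hwle : s + w ≤ lst.length := by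
        rw [← hw]
        have h1 := pvWlen_le_length ([] : List Int) (lst.drop s)
        simp only [List.length_drop] at h1
        omega
      have hndw : (pvWin lst s (s + w)).Nodup := by
        have h2 := pvWlen_take_nodup (lst.drop s) [] (by simp)
        rw [hw] at h2
        simpa [pvWin, Nat.add_sub_cancel_left] using h2
      simp only [hext]
      -- the appended slices for this start
      have happ : (PySem.List.pyRange (s : Int) ((s + w : Nat) : Int) 1).foldl
          (fun res e => res ++ [PySem.List.slice lst (some (s : Int)) (some (e + 1))]) results
          = results ++ pvBody lst s := by
        rw [PySem.List.foldl_append_singleton_eq_map]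
        congr 1
        rw [PySem.List.pyRange_one, List.map_map]
        unfold pvBody
        have hlen : (((s + w : Nat) : Int) - (s : Int)).toNat = w := by omega
        rw [hlen, hw]
        apply List.map_congr_left
        intro k _
        simp only [Function.comp_apply]
        have h1 : ((s : Int) + (k : Int) + 1) = ((s : Int) + ((k + 1 : Nat) : Int)) := by
          push_cast; ring
        rw [h1, PySem.List.slice_natCast_add]
      -- discard removes exactly the departing left element
      have hcons : pvWin lst s (s + w) = lst[s] :: pvWin lst (s + 1) (s + w) :=
        pvWin_cons lst s (s + w) (by omega) hsl
      have hget : PySem.List.pyGetD lst (s : Int) 0 = lst[s] := by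
        rw [PySem.List.pyGetD_natCast, List.getD_eq_getElem?_getD, List.getElem?_eq_getElem hsl]
        rfl
      have hdisc : PySem.Set.discard (pvWin lst s (s + w)) (PySem.List.pyGetD lst (s : Int) 0)
          = pvWin lst (s + 1) (s + w) := by
        rw [hget, hcons]
        have hnotin : lst[s] ∉ pvWin lst (s + 1) (s + w) := by
          have := hndw
          rw [hcons] at this
          exact (List.nodup_cons.mp this).1
        simp only [PySem.Set.discard, List.filter_cons]
        rw [if_neg (by simp)]
        apply List.filter_eq_self.mpr
        intro y hy
        simp only [Bool.not_eq_eq_eq_not, Bool.not_true, beq_eq_false_iff_ne, ne_eq]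
        intro h
        exact hnotin (h ▸ hy)
      have hndw' : (pvWin lst (s + 1) (s + w)).Nodup := by
        rw [hcons] at hndw
        exact (List.nodup_cons.mp hndw).2
      simp only [happ, hdisc]
      have hcast : ((s : Int) + 1) = ((s + 1 : Nat) : Int) := by push_cast; ring
      rw [hcast, ih (s + 1) (s + w) (results ++ pvBody lst s) (by omega) (by omega) hwle hndw']
      have hr2 : lst.length - s = (lst.length - (s + 1)) + 1 := by omega
      rw [hr2, List.range'_succ, List.flatMap_cons, List.append_assoc]
    · have : s = lst.length := by omega
      subst this
      rw [PySem.List.pyRange_one_eq_nil (by simp [PySem.List.len])]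
      simp

-- ===== VERDICT (by name: the statement is the Claim_ definition above) =====
theorem list_of_consec_ints_spec : Claim_equal_list_of_consec_ints := by
  intro lst _
  unfold Spec_list_of_consec_ints list_of_consec_ints list_of_consec_ints_alt
  have hA := pvOuterA lst lst.length 0 [] (by omega) (by omega)
  have hB := pvOuterB lst lst.length 0 0 [] (by omega) le_rfl (by omega)
    (by simp [pvWin])
  have hwin : pvWin lst 0 0 = ([] : List Int) := by simp [pvWin]
  rw [hwin] at hB
  exact hA.trans hB.symm
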